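-- pv_equiv track=rewrite | github.com/linkml/linkml | packages/linkml_runtime/processing/referencevalidator.py | _linearize_nested_list_column_order
-- ===== SOURCE A (Python) =====
-- def _linearize_nested_list_column_order(nested_list):
--     result = []
--     if not nested_list:
--         return result
--
--     num_rows = len(nested_list)
--     max_row_len = max(len(row) for row in nested_list)
--
--     for col in range(max_row_len):
--         for row in range(num_rows):
--             if col < len(nested_list[row]):
--                 result.append(nested_list[row][col])
--
--     return result
-- ===== SOURCE B (Python) =====
-- def _linearize_nested_list_column_order(nested_list):
--     # One pass: bucket each element by its column index, then concatenate buckets.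
--     buckets = []
--     for row in nested_list:
--         for i, x in enumerate(row):
--             if i < len(buckets):
--                 buckets[i].append(x)
--             else:
--                 buckets.append([x])
--     result = []
--     for b in buckets:
--         result.extend(b)
--     return result
-- ===== Notes on version B (the rewrite author's own statement) =====
-- stated objective: alternative
-- what changed: Instead of scanning every row once per column (column-major nested loops with index probes), B makes a single pass over the rows, bucketing each element by its column index, and concatenates the buckets.
import Mathlib
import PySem

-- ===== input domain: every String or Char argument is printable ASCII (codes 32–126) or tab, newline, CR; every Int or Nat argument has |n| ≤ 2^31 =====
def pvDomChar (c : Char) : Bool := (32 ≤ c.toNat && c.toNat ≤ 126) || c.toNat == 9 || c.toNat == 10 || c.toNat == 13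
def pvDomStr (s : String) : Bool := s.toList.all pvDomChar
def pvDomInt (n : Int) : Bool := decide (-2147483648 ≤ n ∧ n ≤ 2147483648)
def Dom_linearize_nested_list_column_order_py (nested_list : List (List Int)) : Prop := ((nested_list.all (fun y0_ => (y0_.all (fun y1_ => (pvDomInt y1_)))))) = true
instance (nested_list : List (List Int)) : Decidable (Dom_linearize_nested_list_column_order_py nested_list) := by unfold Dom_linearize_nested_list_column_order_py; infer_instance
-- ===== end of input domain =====

-- B buckets each element by its column index in ONE pass over the rows and then
-- concatenates the buckets, instead of A's rescan of every row once per column.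

-- ===== PORT A =====
-- column-by-column scan: for col in range(max_row_len): for row in range(num_rows): …
def linearize_nested_list_column_order_py (nested_list : List (List Int)) : List Int :=
  if nested_list = [] then []
  else
    let num_rows := nested_list.length
    -- Python max(len(row) for row in nested_list); the list is nonempty here and
    -- lengths are ≥ 0, so the running max started at 0 is exact
    let max_row_len := (nested_list.map (fun r => r.length)).foldl Nat.max 0
    (List.range max_row_len).foldl (fun res col =>
      (List.range num_rows).foldl (fun res row =>
        -- nested_list[row] and nested_list[row][col]: indices are in range here,
        -- guarded by row < num_rows and col < len(nested_list[row])
        let r := nested_list.getD row []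
        if col < r.length then res ++ [r.getD col 0] else res) res) []

-- ===== PORT B =====
-- inner enumerate loop of Source B: put row[i] into buckets[i], creating the bucket
-- when i == len(buckets) (i walks the row and the buckets in lockstep)
def pvAddRow : List (List Int) → List Int → List (List Int)
  | bs, [] => bs
  | [], x :: xs => [x] :: pvAddRow [] xs
  | b :: bs, x :: xs => (b ++ [x]) :: pvAddRow bs xs

def linearize_nested_list_column_order_py_alt (nested_list : List (List Int)) : List Int :=
  let buckets := nested_list.foldl pvAddRow []
  buckets.foldl (fun res b => res ++ b) []

-- ===== PRECONDITION & SPEC =====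
def Spec_linearize_nested_list_column_order_py (nested_list : List (List Int)) (out : List Int) : Prop := out = linearize_nested_list_column_order_py_alt nested_list
instance (nested_list : List (List Int)) (out : List Int) : Decidable (Spec_linearize_nested_list_column_order_py nested_list out) := by unfold Spec_linearize_nested_list_column_order_py; infer_instance

-- ===== CLAIM (what is proved, stated in full; the proofs are below) =====
def Claim_equal_linearize_nested_list_column_order_py : Prop := ∀ (nested_list : List (List Int)), Dom_linearize_nested_list_column_order_py nested_list → Spec_linearize_nested_list_column_order_py nested_list (linearize_nested_list_column_order_py nested_list)

-- ===== LEMMAS AND PROOFS =====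

-- column c of the ragged matrix
def pvCol (c : Nat) (L : List (List Int)) : List Int := L.filterMap (fun r => r[c]?)

-- merge of one option'd cell into an option'd bucket, the get?-level action of pvAddRow
def pvMerge : Option (List Int) → Option Int → Option (List Int)
  | some b, some x => some (b ++ [x])
  | some b, none => some b
  | none, some x => some [x]
  | none, none => none

theorem pvAddRow_getElem? (bs : List (List Int)) (r : List Int) (c : Nat) :
    (pvAddRow bs r)[c]? = pvMerge bs[c]? r[c]? := by
  induction bs, r using pvAddRow.induct generalizing c with
  | case1 bs =>
      cases h : bs[c]? <;> simp [pvAddRow, pvMerge, h]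
  | case2 x xs ih =>
      cases c with
      | zero => simp [pvAddRow, pvMerge]
      | succ n => simpa [pvAddRow, pvMerge] using ih n
  | case3 b bs x xs ih =>
      cases c with
      | zero => simp [pvAddRow, pvMerge]
      | succ n => simpa [pvAddRow] using ih n

theorem pvCol_append (c : Nat) (M : List (List Int)) (r : List Int) :
    pvCol c (M ++ [r]) = pvCol c M ++ (r[c]?).toList := by
  cases h : r[c]? <;> simp [pvCol, h]

-- the buckets after all rows: bucket c exists iff column c is nonempty, and equals it
theorem pvBuckets_getElem? (L : List (List Int)) (c : Nat) :
    (L.foldl pvAddRow [])[c]? = if pvCol c L = [] then none else some (pvCol c L) := by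
  induction L using List.reverseRecOn with
  | nil => simp [pvCol]
  | append_singleton M r ih =>
      rw [List.foldl_append, List.foldl_cons, List.foldl_nil, pvAddRow_getElem?, ih,
        pvCol_append]
      cases h : r[c]? <;> split_ifs with h1 <;> simp_all [pvMerge]

theorem pvCol_eq_nil_iff (L : List (List Int)) (c : Nat) :
    pvCol c L = [] ↔ ∀ r ∈ L, r.length ≤ c := by
  simp [pvCol, List.filterMap_eq_nil_iff]

theorem lt_foldl_max (l : List Nat) (a c : Nat) :
    c < l.foldl Nat.max a ↔ c < a ∨ ∃ x ∈ l, c < x := by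
  induction l generalizing a with
  | nil => simp
  | cons y t ih =>
      rw [List.foldl_cons, ih]
      constructor
      · rintro (h | h)
        · rcases lt_max_iff.mp h with h' | h'
          · exact Or.inl h'
          · exact Or.inr ⟨y, by simp, h'⟩
        · rcases h with ⟨x, hx, hc⟩; exact Or.inr ⟨x, by simp [hx], hc⟩
      · rintro (h | ⟨x, hx, hc⟩)
        · exact Or.inl (lt_max_iff.mpr (Or.inl h))
        · rcases List.mem_cons.mp hx with rfl | hx'
          · exact Or.inl (lt_max_iff.mpr (Or.inr hc))
          · exact Or.inr ⟨x, hx', hc⟩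

-- the buckets list has exactly max_row_len entries
theorem pvBuckets_length (L : List (List Int)) :
    (L.foldl pvAddRow []).length = (L.map (fun r => r.length)).foldl Nat.max 0 := by
  have key : ∀ c, c < (L.foldl pvAddRow []).length ↔
      c < (L.map (fun r => r.length)).foldl Nat.max 0 := by
    intro c
    rw [lt_foldl_max]
    by_cases hc : pvCol c L = []
    · have hb : (L.foldl pvAddRow [])[c]? = none := by
        rw [pvBuckets_getElem?]; simp [hc]
      have hle : (L.foldl pvAddRow []).length ≤ c := List.getElem?_eq_none_iff.mp hb
      constructor
      · omega
      · rintro (h | ⟨x, hx, hcx⟩)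
        · omega
        · rcases List.mem_map.mp hx with ⟨r, hr, rfl⟩
          exact absurd hc (by rw [pvCol_eq_nil_iff]; push Not; exact ⟨r, hr, by omega⟩)
    · have hb : (L.foldl pvAddRow [])[c]? ≠ none := by
        rw [pvBuckets_getElem?]; simp [hc]
      have hlt : c < (L.foldl pvAddRow []).length := by
        by_contra h
        exact hb (List.getElem?_eq_none_iff.mpr (by omega))
      rw [pvCol_eq_nil_iff] at hc
      push Not at hc
      rcases hc with ⟨r, hr, hlen⟩
      exact ⟨fun _ => Or.inr ⟨r.length, List.mem_map_of_mem hr, hlen⟩, fun _ => hlt⟩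
  rcases Nat.lt_trichotomy (L.foldl pvAddRow []).length
      ((L.map (fun r => r.length)).foldl Nat.max 0) with h | h | h
  · exact absurd ((key _).mpr h) (Nat.lt_irrefl _)
  · exact h
  · exact absurd ((key _).mp h) (Nat.lt_irrefl _)

-- buckets = the nonempty columns, in order
theorem pvBuckets_eq (L : List (List Int)) :
    L.foldl pvAddRow [] =
      (List.range (L.foldl pvAddRow []).length).map (fun c => pvCol c L) := by
  apply List.ext_getElem?
  intro c
  rw [pvBuckets_getElem?]
  by_cases h : c < (L.foldl pvAddRow []).length
  · have : (L.foldl pvAddRow [])[c]? ≠ none := by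
      intro hn; exact absurd (List.getElem?_eq_none_iff.mp hn) (by omega)
    rw [pvBuckets_getElem?] at this
    split_ifs at this ⊢ with hc
    · exact absurd rfl this
    · simp [h]
  · have hnone : (L.foldl pvAddRow [])[c]? = none := List.getElem?_eq_none_iff.mpr (by omega)
    have hnil : pvCol c L = [] := by
      by_contra hc
      rw [pvBuckets_getElem?, if_neg hc] at hnone
      simp at hnone
    rw [if_pos hnil]
    simp [h]

-- A's inner loop over row indices appends exactly column c
theorem inner_loop_eq (L : List (List Int)) (c : Nat) (acc : List Int) :
    (List.range L.length).foldl (fun res row =>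
        let r := L.getD row []
        if c < r.length then res ++ [r.getD c 0] else res) acc
      = acc ++ pvCol c L := by
  induction L using List.reverseRecOn generalizing acc with
  | nil => simp [pvCol]
  | append_singleton M r ih =>
      rw [List.length_append, List.length_cons, List.length_nil, List.range_succ,
        List.foldl_append, List.foldl_cons, List.foldl_nil]
      have hbody : (List.range M.length).foldl (fun res row =>
          let r' := (M ++ [r]).getD row []
          if c < r'.length then res ++ [r'.getD c 0] else res) acc
        = (List.range M.length).foldl (fun res row =>
          let r' := M.getD row []
          if c < r'.length then res ++ [r'.getD c 0] else res) acc := by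
        apply List.foldl_ext
        intro a row hrow
        have hlt : row < M.length := List.mem_range.mp hrow
        simp [List.getD_eq_getElem?_getD, List.getElem?_append_left hlt]
      rw [hbody, ih, pvCol_append]
      have hr : (M ++ [r]).getD M.length [] = r := by
        simp [List.getD_eq_getElem?_getD]
      rw [hr]
      cases h : r[c]? with
      | none =>
          have : ¬ c < r.length := by
            simpa [List.getElem?_eq_none_iff] using h
          simp [this]
      | some x =>
          obtain ⟨hc, heq⟩ := List.getElem?_eq_some_iff.mp h
          simp [hc, heq, List.append_assoc]

-- ===== VERDICT (by name: the statement is the Claim_ definition above) =====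
theorem linearize_nested_list_column_order_py_spec : Claim_equal_linearize_nested_list_column_order_py := by
  intro L _
  show linearize_nested_list_column_order_py L = linearize_nested_list_column_order_py_alt L
  by_cases hL : L = []
  · subst hL; rfl
  · unfold linearize_nested_list_column_order_py linearize_nested_list_column_order_py_alt
    rw [if_neg hL]
    rw [PySem.List.foldl_append_eq_flatten]
    conv_rhs => rw [pvBuckets_eq, pvBuckets_length]
    have houter : (List.range ((L.map (fun r => r.length)).foldl Nat.max 0)).foldl
        (fun res col => (List.range L.length).foldl (fun res row =>
          let r := L.getD row []
          if col < r.length then res ++ [r.getD col 0] else res) res) []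
      = (List.range ((L.map (fun r => r.length)).foldl Nat.max 0)).foldl
        (fun res col => res ++ pvCol col L) [] := by
      apply List.foldl_ext
      intro a col _
      exact inner_loop_eq L col a
    rw [houter, PySem.List.foldl_append_eq_flatMap]
    simp [List.flatMap_def]
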